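-- pv_equiv track=rewrite | github.com/microsoft/qdk | source/qdk_package/qdk/qre/models/qec/_yoked.py | _min_area_shape
-- ===== SOURCE A (Python) =====
-- from math import ceil
--
-- def _min_area_shape(num_qubits: int) -> tuple[int, int]:
--     """
--     Given a number of qubits num_qubits, returns numbers (a + 1) and (b + 2)
--     such that a * b >= num_qubits and a * b is as small as possible.
--     """
--
--     best_a = None
--     best_b = None
--     best_qubits = num_qubits**2
--
--     for a in range(1, num_qubits):
--         # Compute required number of columns to reach the required number
--         # of logical qubits
--         b = ceil(num_qubits / a)
--
--         qubits = (a + 1) * (b + 2)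
--         if qubits < best_qubits:
--             best_qubits = qubits
--             best_a = a
--             best_b = b
--
--     assert best_a is not None
--     assert best_b is not None
--     return best_a + 1, best_b + 2
-- ===== SOURCE B (Python) =====
-- from math import isqrt
--
--
-- def _min_area_shape(num_qubits: int) -> tuple[int, int]:
--     """
--     Given a number of qubits num_qubits, returns numbers (a + 1) and (b + 2)
--     such that a * b >= num_qubits and a * b is as small as possible.
--
--     Only O(sqrt(n)) candidate values of a need to be inspected: the optimal a
--     is a fixed point of a -> ceil(n / ceil(n / a)), so it is either at most
--     isqrt(n) or of the form ceil(n / b) for some b in [2, isqrt(n) + 1].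
--     """
--     n = num_qubits
--     r = isqrt(n)
--     cands = set(range(1, r + 1))
--     for b in range(2, r + 2):
--         cands.add(-(-n // b))
--     best = None
--     for a in sorted(cands):
--         q = (a + 1) * (-(-n // a) + 2)
--         if best is None or q < best[0]:
--             best = (q, a)
--     a = best[1]
--     return a + 1, -(-n // a) + 2
-- ===== Notes on version B (the rewrite author's own statement) =====
-- stated objective: faster
-- what changed: Instead of scanning every a in [1, n), B enumerates only the O(sqrt n) candidate widths (a <= isqrt(n), plus a = ceil(n/b) for b in [2, isqrt(n)+1]) -- the optimal a is a fixed point of a -> ceil(n/ceil(n/a)), so it lies in this set -- and takes the first minimizer over the sorted candidates.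
-- outside the precondition, e.g. on _min_area_shape(1): A raises AssertionError, B returns (2, 3); on _min_area_shape(2): A raises AssertionError, B returns (2, 4); on _min_area_shape(3): A raises AssertionError, B returns (2, 5)
import Mathlib
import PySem

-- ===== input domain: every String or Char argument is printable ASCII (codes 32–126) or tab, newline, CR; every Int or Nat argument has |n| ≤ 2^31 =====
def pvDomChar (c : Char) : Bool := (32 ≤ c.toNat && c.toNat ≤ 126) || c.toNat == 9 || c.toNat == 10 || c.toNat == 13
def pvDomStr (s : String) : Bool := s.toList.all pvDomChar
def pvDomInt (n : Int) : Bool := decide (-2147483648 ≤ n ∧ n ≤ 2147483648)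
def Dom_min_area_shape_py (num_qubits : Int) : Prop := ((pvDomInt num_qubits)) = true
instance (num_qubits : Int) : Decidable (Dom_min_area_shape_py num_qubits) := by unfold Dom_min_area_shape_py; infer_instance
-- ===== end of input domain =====

-- B replaces A's O(n) scan over all a with the O(√n) candidate set {1..isqrt n} ∪ {ceil(n/b) : 2 ≤ b ≤ isqrt n + 1}.

-- ===== PORT A =====
-- math.ceil(num_qubits / a) is ported as the exact integer ceiling -((-num_qubits) // a):
-- exact for 1 ≤ a and |num_qubits| ≤ 2^31 (the float quotient rounds to a value with the same ceiling).
def min_area_shape_py (num_qubits : Int) : List Int :=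
  let res := (PySem.List.pyRange 1 num_qubits 1).foldl
    (fun s a =>
      let b := -(PySem.Int.floordiv (-num_qubits) a)
      let qubits := (a + 1) * (b + 2)
      if qubits < s.2.2 then (some a, some b, qubits) else s)
    ((none, none, num_qubits ^ 2) : Option Int × Option Int × Int)
  match res.1, res.2.1 with
  | some ba, some bb => [ba + 1, bb + 2]
  | _, _ => []   -- best_a is None: the assert fails (excluded by Pre_)

-- ===== PORT B =====
-- math.isqrt ported by hand (Nat.sqrt is not kernel-reducible): fuel-bounded linear search,
-- exact for 0 ≤ n < 65537^2, which covers the whole domain |n| ≤ 2^31 (negative n raise in Python: outside Pre_).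
def isqrtAux (n : Nat) : Nat → Nat → Nat
  | 0, r => r
  | f+1, r => if (r+1)*(r+1) ≤ n then isqrtAux n f (r+1) else r

def intSqrt (n : Int) : Int := ((isqrtAux n.toNat 65536 0 : Nat) : Int)

def min_area_shape_py_alt (num_qubits : Int) : List Int :=
  let n := num_qubits
  let r : Int := intSqrt n
  let cands := (PySem.List.pyRange 2 (r + 2) 1).foldl
    (fun s b => PySem.Set.add s (-(PySem.Int.floordiv (-n) b)))
    (PySem.Set.ofList (PySem.List.pyRange 1 (r + 1) 1))
  let best := (PySem.List.sorted cands (fun x => x) false).foldl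
    (fun acc a =>
      let q := (a + 1) * (-(PySem.Int.floordiv (-n) a) + 2)
      match acc with
      | none => some (q, a)
      | some b => if q < b.1 then some (q, a) else acc)
    (none : Option (Int × Int))
  match best with
  | some (_, a) => [a + 1, -(PySem.Int.floordiv (-n) a) + 2]
  | none => []   -- best is None: Python raises TypeError (excluded by Pre_)

-- ===== PRECONDITION & SPEC =====
-- Pre_ is exactly the set of inputs on which A returns: for num_qubits ≤ 3 no a ever beats the
-- initial bound num_qubits**2 (or the range is empty) and A's assert raises AssertionError.
def Pre_min_area_shape_py (num_qubits : Int) : Prop := 4 ≤ num_qubits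
instance (num_qubits : Int) : Decidable (Pre_min_area_shape_py num_qubits) := by unfold Pre_min_area_shape_py; infer_instance
def pvWitness_min_area_shape_py : Int := 7

def Spec_min_area_shape_py (num_qubits : Int) (out : List Int) : Prop := out = min_area_shape_py_alt num_qubits
instance (num_qubits : Int) (out : List Int) : Decidable (Spec_min_area_shape_py num_qubits out) := by unfold Spec_min_area_shape_py; infer_instance

-- ===== CLAIM (what is proved, stated in full; the proofs are below) =====
def Claim_equal_min_area_shape_py : Prop := ∀ (num_qubits : Int), Dom_min_area_shape_py num_qubits → Pre_min_area_shape_py num_qubits → Spec_min_area_shape_py num_qubits (min_area_shape_py num_qubits)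

-- ===== LEMMAS AND PROOFS =====

-- ceiling division ceil(n/a) = -((-n)//a) and the key (a+1)*(ceil(n/a)+2) both ports minimize
def cdiv (n a : Int) : Int := -(PySem.Int.floordiv (-n) a)
def keyf (n a : Int) : Int := (a + 1) * (cdiv n a + 2)

-- predicates characterising the first strict minimiser of a scan
def predQ (k : Int → Int) (q : Int) (L : List Int) (x : Int) : Bool :=
  decide (k x < q) && L.all (fun z => decide (k x ≤ k z))
def predM (k : Int → Int) (L : List Int) (x : Int) : Bool :=
  L.all (fun z => decide (k x ≤ k z))

lemma isqrtAux_spec (n : Nat) : ∀ (f r : Nat), r * r ≤ n → n < (r + f + 1) * (r + f + 1) →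
    isqrtAux n f r * isqrtAux n f r ≤ n ∧ n < (isqrtAux n f r + 1) * (isqrtAux n f r + 1) := by
  intro f
  induction f with
  | zero =>
    intro r h1 h2
    refine ⟨by simpa [isqrtAux] using h1, by simpa [isqrtAux] using h2⟩
  | succ f ih =>
    intro r h1 h2
    rw [isqrtAux]
    split
    · apply ih
      · assumption
      · have he : r + 1 + f + 1 = r + (f + 1) + 1 := by omega
        rw [he]; exact h2
    · exact ⟨h1, by omega⟩

lemma intSqrt_spec (n : Int) (h0 : 0 ≤ n) (h1 : n ≤ 2147483648) :
    0 ≤ intSqrt n ∧ intSqrt n * intSqrt n ≤ n ∧ n < (intSqrt n + 1) * (intSqrt n + 1) := by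
  have hb : n.toNat < (0 + 65536 + 1) * (0 + 65536 + 1) := by omega
  obtain ⟨hle, hlt⟩ := isqrtAux_spec n.toNat 65536 0 (by simp) hb
  have hn : ((n.toNat : Int)) = n := Int.toNat_of_nonneg h0
  unfold intSqrt
  refine ⟨by positivity, ?_, ?_⟩
  · rw [← hn]; exact_mod_cast hle
  · rw [← hn]; exact_mod_cast hlt

lemma cdiv_bounds (n a : Int) (ha : 0 < a) :
    (cdiv n a - 1) * a < n ∧ n ≤ cdiv n a * a :=
  (PySem.Int.neg_floordiv_neg_eq_iff_of_pos (a := n) (b := a) (q := cdiv n a) ha).mp rfl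

lemma cdiv_le_iff (n a b : Int) (ha : 0 < a) : cdiv n a ≤ b ↔ n ≤ a * b := by
  obtain ⟨h1, h2⟩ := cdiv_bounds n a ha
  constructor
  · intro h
    calc n ≤ cdiv n a * a := h2
    _ ≤ b * a := by nlinarith
    _ = a * b := by ring
  · intro h
    by_contra hc
    have hc' : b + 1 ≤ cdiv n a := by omega
    have : b * a ≤ (cdiv n a - 1) * a := by nlinarith
    nlinarith

lemma one_le_cdiv (n a : Int) (hn : 1 ≤ n) (ha : 0 < a) : 1 ≤ cdiv n a := by
  by_contra h
  have h0 : cdiv n a ≤ 0 := by omega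
  rw [cdiv_le_iff n a 0 ha] at h0
  omega

lemma cdiv_antitone (n a a' : Int) (hn : 1 ≤ n) (ha : 0 < a) (h : a ≤ a') :
    cdiv n a' ≤ cdiv n a := by
  have ha' : 0 < a' := by omega
  rw [cdiv_le_iff n a' _ ha']
  have h2 := (cdiv_bounds n a ha).2
  have h1 := one_le_cdiv n a hn ha
  nlinarith

lemma find?_congr_mem {α : Type} (L : List α) (p q : α → Bool)
    (h : ∀ x ∈ L, p x = q x) : L.find? p = L.find? q := by
  induction L with
  | nil => rfl
  | cons a t ih =>
    simp only [List.find?]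
    rw [h a (by simp)]
    cases hq : q a with
    | true => rfl
    | false => exact ih (fun x hx => h x (by simp [hx]))

lemma exists_min (k : Int → Int) (t : List Int) (hne : t ≠ []) :
    ∃ x ∈ t, ∀ z ∈ t, k x ≤ k z := by
  induction t with
  | nil => exact absurd rfl hne
  | cons a s ih =>
    by_cases hs : s = []
    · exact ⟨a, by simp, by simp [hs]⟩
    · obtain ⟨x, hx, hmin⟩ := ih hs
      by_cases hax : k a ≤ k x
      · refine ⟨a, by simp, ?_⟩
        intro z hz
        rcases List.mem_cons.mp hz with rfl | hz
        · exact le_refl _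
        · exact le_trans hax (hmin z hz)
      · refine ⟨x, by simp [hx], ?_⟩
        intro z hz
        rcases List.mem_cons.mp hz with rfl | hz
        · omega
        · exact hmin z hz

-- predicate bridges used in both scan inductions
lemma predQ_cons_self_true (k : Int → Int) (q : Int) (a : Int) (t : List Int)
    (hq : k a < q) (hall : ∀ x ∈ t, k a ≤ k x) : predQ k q (a :: t) a = true := by
  simp only [predQ, Bool.and_eq_true, decide_eq_true_eq, List.all_eq_true, List.mem_cons]
  refine ⟨hq, fun z hz => ?_⟩
  rcases hz with rfl | hz
  · exact le_refl _
  · exact hall z hz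

lemma predQ_none_of_min (k : Int → Int) (t : List Int) (a : Int)
    (hall : ∀ x ∈ t, k a ≤ k x) : t.find? (predQ k (k a) t) = none := by
  rw [List.find?_eq_none]
  intro x hx
  simp only [predQ, Bool.and_eq_true, decide_eq_true_eq, List.all_eq_true, not_and]
  intro h
  exact absurd (hall x hx) (by omega)

lemma predQ_congr_beats (k : Int → Int) (q : Int) (a : Int) (t : List Int)
    (hq : k a < q) (y : Int) (hy : y ∈ t) (hya : k y < k a) :
    ∀ x ∈ t, predQ k q (a :: t) x = predQ k (k a) t x := by
  intro x hx
  by_cases hxa : k x < k a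
  · simp only [predQ, lt_trans hxa hq, hxa, decide_true, Bool.true_and, List.all_cons,
      le_of_lt hxa]
  · have h1 : predQ k (k a) t x = false := by
      simp only [predQ, hxa, decide_false, Bool.false_and]
    have h2 : predQ k q (a :: t) x = false := by
      rw [Bool.eq_false_iff]
      intro hT
      simp only [predQ, Bool.and_eq_true, decide_eq_true_eq, List.all_eq_true] at hT
      obtain ⟨-, hall2⟩ := hT
      have ha1 := hall2 a (by simp)
      have ha2 := hall2 y (by simp [hy])
      omega
    rw [h1, h2]

lemma predQ_congr_nobeat (k : Int → Int) (q : Int) (a : Int) (t : List Int)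
    (hq : ¬ k a < q) :
    ∀ x ∈ t, predQ k q (a :: t) x = predQ k q t x := by
  intro x hx
  by_cases hxq : k x < q
  · simp only [predQ, hxq, decide_true, Bool.true_and, List.all_cons,
      show k x ≤ k a by omega]
  · simp only [predQ, hxq, decide_false, Bool.false_and]

-- the head beats q but something in the tail beats the head: find? dives into the tail
lemma find?_cons_beats (k : Int → Int) (q a : Int) (t : List Int) (hq : k a < q)
    (y : Int) (hy : y ∈ t) (hya : k y < k a) :
    ∃ z, (a :: t).find? (predQ k q (a :: t)) = some z ∧ t.find? (predQ k (k a) t) = some z := by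
  have hna : ¬ predQ k q (a :: t) a = true := by
    simp only [predQ, Bool.and_eq_true, decide_eq_true_eq, List.all_eq_true, List.mem_cons, not_and]
    intro _ hall
    exact absurd (hall y (Or.inr hy)) (by omega)
  rw [List.find?_cons_of_neg hna, find?_congr_mem t _ _ (predQ_congr_beats k q a t hq y hy hya)]
  obtain ⟨x, hx, hxmin⟩ := exists_min k t (List.ne_nil_of_mem hy)
  have hpx : predQ k (k a) t x = true := by
    simp only [predQ, Bool.and_eq_true, decide_eq_true_eq, List.all_eq_true]
    exact ⟨by have := hxmin y hy; omega, hxmin⟩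
  cases hF : t.find? (predQ k (k a) t) with
  | some z => exact ⟨z, rfl, rfl⟩
  | none =>
    rw [List.find?_eq_none] at hF
    exact absurd hpx (by simpa using hF x hx)

lemma scanA (k g : Int → Int) (L : List Int) (o p : Option Int) (q : Int) :
    L.foldl (fun s a => if k a < s.2.2 then (some a, some (g a), k a) else s) (o, p, q)
      = match L.find? (predQ k q L) with
        | some a => (some a, some (g a), k a)
        | none => (o, p, q) := by
  induction L generalizing o p q with
  | nil => rfl
  | cons a t ih =>
    rw [List.foldl_cons]
    by_cases hq : k a < q
    · simp only [hq, if_pos]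
      rw [ih]
      by_cases hall : ∀ x ∈ t, k a ≤ k x
      · rw [predQ_none_of_min k t a hall,
          List.find?_cons_of_pos (predQ_cons_self_true k q a t hq hall)]
      · have hall2 : ∃ y ∈ t, k y < k a := by
          by_contra hno
          refine hall fun x hx => ?_
          by_contra hk
          exact hno ⟨x, hx, by omega⟩
        obtain ⟨y, hy, hya⟩ := hall2
        obtain ⟨z, h1, h2⟩ := find?_cons_beats k q a t hq y hy (by omega)
        rw [h1, h2]
    · simp only [hq, if_neg, not_false_iff]
      rw [ih]
      have hna : ¬ predQ k q (a :: t) a = true := by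
        simp only [predQ, Bool.and_eq_true, decide_eq_true_eq, not_and]
        intro h
        exact absurd h hq
      rw [List.find?_cons_of_neg hna, find?_congr_mem t _ _ (predQ_congr_nobeat k q a t hq)]

lemma scanB_some (k : Int → Int) (L : List Int) (q b : Int) :
    L.foldl (fun acc a => match acc with
      | none => some (k a, a)
      | some best => if k a < best.1 then some (k a, a) else acc) (some (q, b))
      = match L.find? (predQ k q L) with
        | some a => some (k a, a)
        | none => some (q, b) := by
  induction L generalizing q b with
  | nil => rfl
  | cons a t ih =>
    rw [List.foldl_cons]
    by_cases hq : k a < q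
    · show t.foldl _ (if k a < q then some (k a, a) else some (q, b)) = _
      simp only [hq, if_pos]
      rw [ih]
      by_cases hall : ∀ x ∈ t, k a ≤ k x
      · rw [predQ_none_of_min k t a hall,
          List.find?_cons_of_pos (predQ_cons_self_true k q a t hq hall)]
      · have hall2 : ∃ y ∈ t, k y < k a := by
          by_contra hno
          refine hall fun x hx => ?_
          by_contra hk
          exact hno ⟨x, hx, by omega⟩
        obtain ⟨y, hy, hya⟩ := hall2
        obtain ⟨z, h1, h2⟩ := find?_cons_beats k q a t hq y hy (by omega)
        rw [h1, h2]
    · show t.foldl _ (if k a < q then some (k a, a) else some (q, b)) = _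
      simp only [hq, if_neg, not_false_iff]
      rw [ih]
      have hna : ¬ predQ k q (a :: t) a = true := by
        simp only [predQ, Bool.and_eq_true, decide_eq_true_eq, not_and]
        intro h
        exact absurd h hq
      rw [List.find?_cons_of_neg hna, find?_congr_mem t _ _ (predQ_congr_nobeat k q a t hq)]

lemma scanB (k : Int → Int) (L : List Int) :
    L.foldl (fun acc a => match acc with
      | none => some (k a, a)
      | some best => if k a < best.1 then some (k a, a) else acc) none
      = match L.find? (predM k L) with
        | some a => some (k a, a)
        | none => none := by
  cases L with
  | nil => rfl
  | cons a t =>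
    rw [List.foldl_cons]
    show t.foldl _ (some (k a, a)) = _
    rw [scanB_some]
    by_cases hall : ∀ x ∈ t, k a ≤ k x
    · rw [predQ_none_of_min k t a hall]
      have hpa : predM k (a :: t) a = true := by
        simp only [predM, List.all_eq_true, List.mem_cons, decide_eq_true_eq]
        intro z hz
        rcases hz with rfl | hz
        · exact le_refl _
        · exact hall z hz
      rw [List.find?_cons_of_pos hpa]
    · have hall2 : ∃ y ∈ t, k y < k a := by
        by_contra hno
        refine hall fun x hx => ?_
        by_contra hk
        exact hno ⟨x, hx, by omega⟩
      obtain ⟨y, hy, hya⟩ := hall2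
      have hna : ¬ predM k (a :: t) a = true := by
        simp only [predM, List.all_eq_true, List.mem_cons, decide_eq_true_eq, not_forall]
        exact ⟨y, ⟨Or.inr hy, by omega⟩⟩
      have hcongr : ∀ x ∈ t, predM k (a :: t) x = predQ k (k a) t x := by
        intro x hx
        by_cases hxa : k x < k a
        · simp only [predM, predQ, List.all_cons, le_of_lt hxa, decide_true,
            hxa, Bool.true_and]
        · have h1 : predQ k (k a) t x = false := by
            simp only [predQ, hxa, decide_false, Bool.false_and]
          have h2 : predM k (a :: t) x = false := by
            rw [Bool.eq_false_iff]
            intro hT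
            simp only [predM, List.all_eq_true, decide_eq_true_eq] at hT
            have ha1 := hT a (by simp)
            have ha2 := hT y (by simp [hy])
            omega
          rw [h1, h2]
      rw [List.find?_cons_of_neg hna, find?_congr_mem t _ _ hcongr]
      obtain ⟨x, hx, hxmin⟩ := exists_min k t (List.ne_nil_of_mem hy)
      have hpx : predQ k (k a) t x = true := by
        simp only [predQ, Bool.and_eq_true, decide_eq_true_eq, List.all_eq_true]
        exact ⟨by have := hxmin y hy; omega, hxmin⟩
      cases hF : t.find? (predQ k (k a) t) with
      | some z => rfl
      | none =>
        rw [List.find?_eq_none] at hF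
        exact absurd hpx (by simpa using hF x hx)

-- on an ascending list, everything before the element find? returned fails the predicate
lemma find?_earlier {p : Int → Bool} {L : List Int} {a : Int}
    (hL : L.Pairwise (· < ·)) (hf : L.find? p = some a) :
    ∀ x ∈ L, x < a → p x = false := by
  induction L with
  | nil => simp
  | cons h t ih =>
    intro x hx hxa
    rcases List.pairwise_cons.mp hL with ⟨hht, ht⟩
    by_cases hph : p h
    · have hah : h = a := by simpa [List.find?, hph] using hf
      rcases List.mem_cons.mp hx with rfl | hxt
      · omega
      · exact absurd (hht x hxt) (by omega)
    · rcases List.mem_cons.mp hx with rfl | hxt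
      · simpa using hph
      · exact ih ht (by simpa [List.find?, hph] using hf) x hxt hxa

-- B's sorted candidate list, as the proofs name it
def sortedS (n : Int) : List Int :=
  PySem.List.sorted
    ((PySem.List.pyRange 2 (intSqrt n + 2) 1).foldl
      (fun s b => PySem.Set.add s (cdiv n b))
      (PySem.Set.ofList (PySem.List.pyRange 1 (intSqrt n + 1) 1)))
    (fun x => x) false

lemma portA_eq (n : Int) :
    min_area_shape_py n
      = match (PySem.List.pyRange 1 n 1).find?
            (predQ (keyf n) (n ^ 2) (PySem.List.pyRange 1 n 1)) with
        | some a => [a + 1, cdiv n a + 2]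
        | none => [] := by
  have h0 : min_area_shape_py n
      = (let res := (PySem.List.pyRange 1 n 1).foldl
            (fun (s : Option Int × Option Int × Int) (a : Int) =>
              if keyf n a < s.2.2 then (some a, some (cdiv n a), keyf n a) else s)
            ((none, none, n ^ 2) : Option Int × Option Int × Int)
         match res.1, res.2.1 with
         | some ba, some bb => [ba + 1, bb + 2]
         | _, _ => []) := rfl
  rw [h0, scanA (keyf n) (cdiv n) (PySem.List.pyRange 1 n 1) none none (n ^ 2)]
  cases (PySem.List.pyRange 1 n 1).find?
      (predQ (keyf n) (n ^ 2) (PySem.List.pyRange 1 n 1)) <;> rfl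

lemma portB_eq (n : Int) :
    min_area_shape_py_alt n
      = match (sortedS n).find? (predM (keyf n) (sortedS n)) with
        | some a => [a + 1, cdiv n a + 2]
        | none => [] := by
  have h0 : min_area_shape_py_alt n
      = (let best := (sortedS n).foldl
            (fun (acc : Option (Int × Int)) (a : Int) =>
              match acc with
              | none => some (keyf n a, a)
              | some best => if keyf n a < best.1 then some (keyf n a, a) else acc)
            none
         match best with
         | some (_, a) => [a + 1, cdiv n a + 2]
         | none => []) := rfl
  rw [h0, scanB (keyf n) (sortedS n)]
  cases (sortedS n).find? (predM (keyf n) (sortedS n)) <;> rfl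

theorem equal_main (n : Int) (hdom : n ≤ 2147483648) (hpre : 4 ≤ n) :
    min_area_shape_py n = min_area_shape_py_alt n := by
  have hn0 : (0 : Int) ≤ n := by omega
  have hn1 : (1 : Int) ≤ n := by omega
  obtain ⟨hr0, hrle, hrlt⟩ := intSqrt_spec n hn0 hdom
  have hr2 : 2 ≤ intSqrt n := by nlinarith
  have hrn : intSqrt n ≤ n - 2 := by nlinarith
  -- abbreviations
  have hmemS : ∀ x : Int, x ∈ sortedS n ↔
      (x ∈ PySem.List.pyRange 1 (intSqrt n + 1) 1 ∨
        ∃ b ∈ PySem.List.pyRange 2 (intSqrt n + 2) 1, x = cdiv n b) := by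
    intro x
    unfold sortedS
    rw [PySem.List.mem_sorted, PySem.Set.mem_foldl_add, PySem.Set.mem_ofList]
  -- the sorted candidate list is strictly increasing
  have hpairS : (sortedS n).Pairwise (· < ·) := by
    have hnodupC : (((PySem.List.pyRange 2 (intSqrt n + 2) 1).foldl
        (fun s b => PySem.Set.add s (cdiv n b))
        (PySem.Set.ofList (PySem.List.pyRange 1 (intSqrt n + 1) 1))) : List Int).Nodup := by
      rw [← PySem.Set.update_map_eq_foldl_add]
      exact PySem.Set.nodup_update _ _ (PySem.Set.nodup_ofList _)
    have hperm := PySem.List.sorted_perm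
      (xs := ((PySem.List.pyRange 2 (intSqrt n + 2) 1).foldl
        (fun s b => PySem.Set.add s (cdiv n b))
        (PySem.Set.ofList (PySem.List.pyRange 1 (intSqrt n + 1) 1))))
      (key := fun x : Int => x) (rev := false)
    have hnd : (sortedS n).Nodup := by
      unfold sortedS
      exact hperm.nodup_iff.mpr hnodupC
    have hle : (sortedS n).Pairwise (fun a b : Int => a ≤ b) := by
      unfold sortedS
      simpa using PySem.List.sorted_pairwise
        (xs := ((PySem.List.pyRange 2 (intSqrt n + 2) 1).foldl
          (fun s b => PySem.Set.add s (cdiv n b))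
          (PySem.Set.ofList (PySem.List.pyRange 1 (intSqrt n + 1) 1))))
        (key := fun x : Int => x)
    exact (hle.and hnd).imp (fun h => lt_of_le_of_ne h.1 h.2)
  -- every candidate is a legal a of A's loop
  have hS_sub : ∀ x ∈ sortedS n, 1 ≤ x ∧ x < n := by
    intro x hx
    rcases (hmemS x).mp hx with h1 | ⟨b, hb, rfl⟩
    · rw [PySem.List.mem_pyRange_one] at h1
      omega
    · rw [PySem.List.mem_pyRange_one] at hb
      have hbpos : (0 : Int) < b := by omega
      have h1 := one_le_cdiv n b hn1 hbpos
      have h2 := cdiv_antitone n 2 b hn1 (by omega) (by omega)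
      have h3 : cdiv n 2 ≤ n - 1 := (cdiv_le_iff n 2 (n - 1) (by omega)).mpr (by omega)
      omega
  -- A's scan: find the first minimiser aA
  have h1L : (1 : Int) ∈ PySem.List.pyRange 1 n 1 := by
    rw [PySem.List.mem_pyRange_one]; omega
  obtain ⟨x0, hx0, hx0min⟩ := exists_min (keyf n) _ (List.ne_nil_of_mem h1L)
  have hc1 : cdiv n 1 = n := by
    obtain ⟨u, v⟩ := cdiv_bounds n 1 (by omega)
    rw [mul_one] at u v
    omega
  have hk1 : keyf n 1 = 2 * (n + 2) := by rw [keyf, hc1]; ring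
  have hkx0 : keyf n x0 < n ^ 2 := by
    have h := hx0min 1 h1L
    rw [hk1] at h
    nlinarith
  have hpx0 : predQ (keyf n) (n ^ 2) (PySem.List.pyRange 1 n 1) x0 = true := by
    simp only [predQ, Bool.and_eq_true, decide_eq_true_eq, List.all_eq_true]
    exact ⟨hkx0, hx0min⟩
  cases hF : (PySem.List.pyRange 1 n 1).find?
      (predQ (keyf n) (n ^ 2) (PySem.List.pyRange 1 n 1)) with
  | none =>
    rw [List.find?_eq_none] at hF
    exact absurd hpx0 (by simpa using hF x0 hx0)
  | some aA =>
  have haAmem := List.mem_of_find?_eq_some hF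
  have hpred := List.find?_some hF
  simp only [predQ, Bool.and_eq_true, decide_eq_true_eq, List.all_eq_true] at hpred
  obtain ⟨hkq, hmin⟩ := hpred
  have haAr : 1 ≤ aA ∧ aA < n := (PySem.List.mem_pyRange_one).mp haAmem
  have hfirst : ∀ z ∈ PySem.List.pyRange 1 n 1, z < aA → keyf n aA < keyf n z := by
    intro z hz hlt
    have hfz := find?_earlier (PySem.List.pairwise_lt_pyRange_one (a := 1) (b := n)) hF z hz hlt
    rw [Bool.eq_false_iff] at hfz
    by_contra hc
    apply hfz
    have hzeq : keyf n z = keyf n aA := le_antisymm (by omega) (hmin z hz)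
    simp only [predQ, Bool.and_eq_true, decide_eq_true_eq, List.all_eq_true]
    exact ⟨by omega, fun w hw => by rw [hzeq]; exact hmin w hw⟩
  -- B's scan: find the first minimiser aB
  have h1S : (1 : Int) ∈ sortedS n := by
    refine (hmemS 1).mpr (Or.inl ?_)
    rw [PySem.List.mem_pyRange_one]
    omega
  obtain ⟨x1, hx1, hx1min⟩ := exists_min (keyf n) _ (List.ne_nil_of_mem h1S)
  have hpx1 : predM (keyf n) (sortedS n) x1 = true := by
    simp only [predM, List.all_eq_true, decide_eq_true_eq]
    exact hx1min
  cases hG : (sortedS n).find? (predM (keyf n) (sortedS n)) with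
  | none =>
    rw [List.find?_eq_none] at hG
    exact absurd hpx1 (by simpa using hG x1 hx1)
  | some aB =>
  have haBmem := List.mem_of_find?_eq_some hG
  have hpredB := List.find?_some hG
  simp only [predM, List.all_eq_true, decide_eq_true_eq] at hpredB
  have hfirstB : ∀ z ∈ sortedS n, z < aB → keyf n aB < keyf n z := by
    intro z hz hlt
    have hfz := find?_earlier hpairS hG z hz hlt
    rw [Bool.eq_false_iff] at hfz
    by_contra hc
    apply hfz
    have hzeq : keyf n z = keyf n aB := le_antisymm (by omega) (hpredB z hz)
    simp only [predM, List.all_eq_true, decide_eq_true_eq]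
    intro w hw
    rw [hzeq]
    exact hpredB w hw
  -- aA is itself a candidate: it is a fixed point of a ↦ ceil(n/ceil(n/a))
  have haApos : (0 : Int) < aA := by omega
  have hb2 : 2 ≤ cdiv n aA := by
    by_contra hc
    have h1' : cdiv n aA ≤ 1 := by omega
    rw [cdiv_le_iff n aA 1 haApos, mul_one] at h1'
    omega
  have hbpos : (0 : Int) < cdiv n aA := by omega
  have hK1 : n ≤ aA * cdiv n aA := by
    have := (cdiv_bounds n aA haApos).2
    nlinarith
  have ha'le : cdiv n (cdiv n aA) ≤ aA :=
    (cdiv_le_iff n (cdiv n aA) aA hbpos).mpr (by nlinarith)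
  have ha'1 : 1 ≤ cdiv n (cdiv n aA) := one_le_cdiv n _ hn1 hbpos
  have hc'le : cdiv n (cdiv n (cdiv n aA)) ≤ cdiv n aA := by
    rw [cdiv_le_iff n _ _ (by omega)]
    have := (cdiv_bounds n (cdiv n aA) hbpos).2
    nlinarith
  have hl1 : 1 ≤ cdiv n (cdiv n (cdiv n aA)) := one_le_cdiv n _ hn1 (by omega)
  have hkle : keyf n (cdiv n (cdiv n aA)) ≤ keyf n aA := by
    rw [keyf, keyf]
    have h1' : cdiv n (cdiv n (cdiv n aA)) + 2 ≤ cdiv n aA + 2 := by omega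
    exact mul_le_mul (by omega) h1' (by omega) (by omega)
  have hmemA' : cdiv n (cdiv n aA) ∈ PySem.List.pyRange 1 n 1 := by
    rw [PySem.List.mem_pyRange_one]
    omega
  have heq : keyf n (cdiv n (cdiv n aA)) = keyf n aA :=
    le_antisymm hkle (hmin _ hmemA')
  have hfix : cdiv n (cdiv n aA) = aA := by
    by_contra hne
    have hlt : cdiv n (cdiv n aA) < aA := lt_of_le_of_ne ha'le hne
    have := hfirst _ hmemA' hlt
    omega
  have haS : aA ∈ sortedS n := by
    rcases (by omega : aA ≤ intSqrt n ∨ intSqrt n < aA) with hle | hgt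
    · exact (hmemS aA).mpr (Or.inl (by rw [PySem.List.mem_pyRange_one]; omega))
    · have hble : cdiv n aA ≤ intSqrt n + 1 := by
        have h2' := cdiv_antitone n (intSqrt n + 1) aA hn1 (by omega) (by omega)
        have h3' : cdiv n (intSqrt n + 1) ≤ intSqrt n + 1 :=
          (cdiv_le_iff n (intSqrt n + 1) (intSqrt n + 1) (by omega)).mpr (by nlinarith)
        omega
      refine (hmemS aA).mpr (Or.inr ⟨cdiv n aA, ?_, hfix.symm⟩)
      rw [PySem.List.mem_pyRange_one]
      omega
  -- the two minimisers coincide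
  have haBA : aB = aA := by
    have h1' := hpredB aA haS
    have h2' : aB ∈ PySem.List.pyRange 1 n 1 := by
      rw [PySem.List.mem_pyRange_one]
      exact hS_sub aB haBmem
    have h3' := hmin aB h2'
    rcases lt_trichotomy aA aB with h | h | h
    · have := hfirstB aA haS h
      omega
    · omega
    · have := hfirst aB h2' h
      omega
  rw [portA_eq, portB_eq, hF, hG, haBA]

theorem min_area_shape_py_spec : Claim_equal_min_area_shape_py := by
  intro n hdom hpre
  unfold Dom_min_area_shape_py pvDomInt at hdom
  unfold Pre_min_area_shape_py at hpre
  unfold Spec_min_area_shape_py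
  simp only [decide_eq_true_eq] at hdom
  exact equal_main n hdom.2 hpre
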